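-- pv_equiv track=rewrite | github.com/erreobi/adventofcode2023 | day13/mirrors.py | isFullReflection
-- ===== SOURCE A (Python) =====
-- def isFullReflection(matrice, row):
--     #it is a full reflection is the mirror reflect it till the end
--     found=True
--     for indexRow in range(0, len(matrice)//2):
--         indexleft = row - indexRow
--         indexRight = row+1+indexRow
--         if indexleft < 0:
--             break;
--         if indexRight >= len(matrice):
--             break;
--         found &= (matrice[indexleft] == matrice[indexRight])
--
--     return found
-- ===== SOURCE B (Python) =====
-- def isFullReflection(matrice, row):
--     # The reflection at `row` is full iff the maximal window of rows centered
--     # on the gap between row and row+1 reads the same forwards and backwards.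
--     n = len(matrice)
--     lo = max(0, 2 * row + 2 - n)
--     hi = max(lo, min(n, 2 * row + 2))
--     window = matrice[lo:hi]
--     return window == window[::-1]
-- ===== Notes on version B (the rewrite author's own statement) =====
-- stated objective: alternative
-- what changed: Instead of walking index pairs outward from the mirror with break guards, B slices out the maximal window centered on the gap (computed in closed form) and tests whether that window is a palindrome by comparing it to its reverse.
import Mathlib
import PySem

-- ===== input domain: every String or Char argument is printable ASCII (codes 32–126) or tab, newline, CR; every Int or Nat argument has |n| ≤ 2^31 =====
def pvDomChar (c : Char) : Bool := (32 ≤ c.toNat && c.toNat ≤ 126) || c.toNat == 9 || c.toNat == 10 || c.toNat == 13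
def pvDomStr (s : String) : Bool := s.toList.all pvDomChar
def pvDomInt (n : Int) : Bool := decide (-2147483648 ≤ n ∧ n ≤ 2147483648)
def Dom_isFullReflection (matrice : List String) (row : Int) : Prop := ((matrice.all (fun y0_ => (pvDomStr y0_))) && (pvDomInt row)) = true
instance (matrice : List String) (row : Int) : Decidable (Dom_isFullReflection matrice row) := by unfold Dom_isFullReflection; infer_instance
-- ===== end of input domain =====

-- B replaces A's outward index walk with a closed-form window slice centered on the
-- mirror gap and a palindrome test (window == window[::-1]); equivalence proved on all inputs.

-- ===== PORT A =====
-- the 'for indexRow in range(0, len(matrice)//2)' loop with its two breaks, carrying 'found'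
def pvLoopA (matrice : List String) (row : Int) : List Nat → Bool → Bool
  | [], found => found
  | indexRow :: rest, found =>
      let indexleft : Int := row - (indexRow : Int)
      let indexRight : Int := row + 1 + (indexRow : Int)
      if indexleft < 0 then found
      else if indexRight ≥ (matrice.length : Int) then found
      else pvLoopA matrice row rest
            (found && (((PySem.List.pyGet? matrice indexleft).getD "") ==
                       ((PySem.List.pyGet? matrice indexRight).getD "")))

def isFullReflection (matrice : List String) (row : Int) : Bool :=
  pvLoopA matrice row (List.range (matrice.length / 2)) true

-- ===== PORT B =====
def isFullReflection_alt (matrice : List String) (row : Int) : Bool :=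
  let n : Int := matrice.length
  let lo : Int := max 0 (2 * row + 2 - n)
  let hi : Int := max lo (min n (2 * row + 2))
  let window := PySem.List.slice matrice (some lo) (some hi)
  window == (PySem.List.slice? window none none (-1)).getD []

-- ===== PRECONDITION & SPEC =====
def Spec_isFullReflection (matrice : List String) (row : Int) (out : Bool) : Prop := out = isFullReflection_alt matrice row
instance (matrice : List String) (row : Int) (out : Bool) : Decidable (Spec_isFullReflection matrice row out) := by unfold Spec_isFullReflection; infer_instance

-- ===== CLAIM (what is proved, stated in full; the proofs are below) =====
def Claim_equal_isFullReflection : Prop := ∀ (matrice : List String) (row : Int), Dom_isFullReflection matrice row → Spec_isFullReflection matrice row (isFullReflection matrice row)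

-- ===== LEMMAS AND PROOFS =====

-- mirror recursion: pairwise equality of the two sides up to the shorter one
def pvMirror : List String → List String → Bool
  | a :: l, b :: r => (a == b) && pvMirror l r
  | _, _ => true

theorem pvMirror_nil_left (r : List String) : pvMirror [] r = true := by
  cases r <;> rfl

theorem pvMirror_nil_right (l : List String) : pvMirror l [] = true := by
  cases l <;> rfl

theorem pvMirror_eq_take (l r : List String) :
    pvMirror l r = (l.take r.length == r.take l.length) := by
  induction l generalizing r with
  | nil => cases r <;> simp [pvMirror]
  | cons a l ih =>
    cases r with
    | nil => simp [pvMirror]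
    | cons b r => simp [pvMirror, ih, List.cons_beq_cons]

-- chkA: A's loop from step s with fuel t, accumulator factored out
def pvChkA (matrice : List String) (row : Int) : Nat → Nat → Bool
  | _, 0 => true
  | s, t + 1 =>
      if row - (s : Int) < 0 then true
      else if row + 1 + (s : Int) ≥ (matrice.length : Int) then true
      else (((PySem.List.pyGet? matrice (row - (s : Int))).getD "") ==
            ((PySem.List.pyGet? matrice (row + 1 + (s : Int))).getD "")) &&
           pvChkA matrice row (s + 1) t

theorem pvLoopA_range' (matrice : List String) (row : Int) (t s : Nat) (acc : Bool) :
    pvLoopA matrice row (List.range' s t) acc = (acc && pvChkA matrice row s t) := by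
  induction t generalizing s acc with
  | zero => simp [pvLoopA, pvChkA]
  | succ t ih =>
    rw [List.range'_succ]
    simp only [pvLoopA, pvChkA]
    split_ifs with h1 h2
    · simp
    · simp
    · rw [ih]
      rw [Bool.and_assoc]

theorem pvMirror_drop_eq_chkA (matrice : List String) (row : Int)
    (hrow : 0 ≤ row) (hlt : row + 1 < (matrice.length : Int))
    (t s : Nat)
    (hfuel : min (row.toNat + 1) (matrice.length - (row.toNat + 1)) ≤ s + t) :
    pvChkA matrice row s t =
      pvMirror (((matrice.take (row.toNat + 1)).reverse).drop s)
               ((matrice.drop (row.toNat + 1)).drop s) := by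
  induction t generalizing s with
  | zero =>
    rcases min_le_iff.mp (by omega : min (row.toNat + 1) (matrice.length - (row.toNat + 1)) ≤ s) with h | h
    · have hz : (((matrice.take (row.toNat + 1)).reverse).drop s) = [] :=
        List.drop_eq_nil_of_le (by simp; omega)
      rw [hz]
      simp [pvChkA, pvMirror_nil_left]
    · have hz : ((matrice.drop (row.toNat + 1)).drop s) = [] :=
        List.drop_eq_nil_of_le (by simp; omega)
      rw [hz]
      simp [pvChkA, pvMirror_nil_right]
  | succ t ih =>
    have hn : row.toNat + 1 ≤ matrice.length := by omega
    simp only [pvChkA]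
    split_ifs with h1 h2
    · have hz : (((matrice.take (row.toNat + 1)).reverse).drop s) = [] :=
        List.drop_eq_nil_of_le (by simp; omega)
      rw [hz]
      simp [pvMirror_nil_left]
    · have hz : ((matrice.drop (row.toNat + 1)).drop s) = [] :=
        List.drop_eq_nil_of_le (by simp; omega)
      rw [hz]
      simp [pvMirror_nil_right]
    · have hs1 : s < row.toNat + 1 := by omega
      have hs2 : row.toNat + 1 + s < matrice.length := by omega
      have hL : s < ((matrice.take (row.toNat + 1)).reverse).length := by simp; omega
      have hR : s < (matrice.drop (row.toNat + 1)).length := by simp; omega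
      rw [List.drop_eq_getElem_cons hL, List.drop_eq_getElem_cons hR]
      have eL : ((matrice.take (row.toNat + 1)).reverse)[s] = matrice[row.toNat - s] := by
        rw [List.getElem_reverse, List.getElem_take]
        congr 1
        simp
        omega
      have eR : (matrice.drop (row.toNat + 1))[s] = matrice[row.toNat + 1 + s] := by
        rw [List.getElem_drop]
      simp only [pvMirror]
      rw [eL, eR, ih (s + 1) (by omega)]
      congr 1
      · rw [PySem.List.pyGet?_eq_some_getElem matrice (by omega) (by omega),
            PySem.List.pyGet?_eq_some_getElem matrice (by omega) (by omega)]
        have h1 : (row - (s : Int)).toNat = row.toNat - s := by omega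
        have h2 : (row + 1 + (s : Int)).toNat = row.toNat + 1 + s := by omega
        simp only [Option.getD_some, h1, h2]

-- Bool equality test on lists of strings is decidable equality
theorem pvBeq_eq_decide (x y : List String) : (x == y) = decide (x = y) := by
  by_cases h : x = y <;> simp [h]

-- the palindrome test on the window a ++ b (|a| = |b|) is the mirror test
theorem pvPal_eq (a b : List String) (h : a.length = b.length) :
    ((a ++ b) == (b.reverse ++ a.reverse)) = (a.reverse == b) := by
  rw [pvBeq_eq_decide, pvBeq_eq_decide]
  apply decide_eq_decide.mpr
  constructor
  · intro he
    have := (List.append_inj he (by simp [h])).1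
    rw [this]
    simp
  · intro he
    have ha : a = b.reverse := by rw [← he]; simp
    rw [ha]
    simp

-- the window in the main case is (L.take m).reverse ++ R.take m
theorem pvWindow_split (matrice : List String) (t m : Nat) (hm1 : m ≤ t)
    (htl : t ≤ matrice.length) :
    (matrice.drop (t - m)).take (2 * m) =
      (((matrice.take t).reverse).take m).reverse ++ (matrice.drop t).take m := by
  have hlen : (matrice.take t).length = t := by simp; omega
  have h1 : ((matrice.take t).reverse).take m = ((matrice.take t).drop (t - m)).reverse := by
    rw [List.take_reverse, hlen]
  rw [h1, List.reverse_reverse]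
  have h2 : (matrice.take t).drop (t - m) = (matrice.drop (t - m)).take m := by
    rw [List.drop_take]
    congr 1
    omega
  have h3 : matrice.drop t = (matrice.drop (t - m)).drop m := by
    rw [List.drop_drop]
    congr 1
    omega
  rw [h2, h3, ← List.take_add]
  congr 1
  omega

-- ===== VERDICT (by name: the statement is the Claim_ definition above) =====
theorem isFullReflection_spec : Claim_equal_isFullReflection := by
  intro matrice row _
  unfold Spec_isFullReflection
  unfold isFullReflection isFullReflection_alt
  rw [List.range_eq_range', pvLoopA_range', Bool.true_and]
  simp only [PySem.List.slice?_none_none_neg_one, Option.getD_some]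
  by_cases hrow : 0 ≤ row
  · by_cases hlt : row + 1 < (matrice.length : Int)
    · -- main case
      set t : Nat := row.toNat + 1 with ht
      set m : Nat := min t (matrice.length - t) with hm
      have hm1 : m ≤ t := by omega
      have hlo : max 0 (2 * row + 2 - (matrice.length : Int)) = ((t - m : Nat) : Int) := by omega
      have hhi : max (max 0 (2 * row + 2 - (matrice.length : Int)))
          (min (matrice.length : Int) (2 * row + 2)) = ((t + m : Nat) : Int) := by omega
      rw [hhi, hlo, PySem.List.slice_natCast]
      have hsub : t + m - (t - m) = 2 * m := by omega
      rw [hsub, pvWindow_split matrice t m hm1 (by omega)]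
      rw [List.reverse_append, pvPal_eq _ _ (by simp; omega)]
      rw [pvMirror_drop_eq_chkA matrice row hrow hlt (matrice.length / 2) 0 (by omega)]
      simp only [List.drop_zero, List.reverse_reverse, ← ht]
      rw [pvMirror_eq_take]
      have hLlen : ((matrice.take t).reverse).length = t := by
        rw [List.length_reverse, List.length_take]
        omega
      have hRlen : (matrice.drop t).length = matrice.length - t := by simp
      rw [hLlen, hRlen]
      congr 1
      · rw [List.take_eq_take_iff, hLlen]
        omega
      · rw [List.take_eq_take_iff, hRlen]
        omega
    · -- row+1 ≥ length: window empty, A trivially true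
      have hA : pvChkA matrice row 0 (matrice.length / 2) = true := by
        cases h : matrice.length / 2 with
        | zero => simp [pvChkA]
        | succ t =>
          simp only [pvChkA]
          rw [if_neg (by omega), if_pos (by push_cast; omega)]
      rw [hA]
      have hlo : 0 ≤ max 0 (2 * row + 2 - (matrice.length : Int)) := le_max_left _ _
      have hhi : max (max 0 (2 * row + 2 - (matrice.length : Int)))
          (min (matrice.length : Int) (2 * row + 2)) = max 0 (2 * row + 2 - (matrice.length : Int)) := by omega
      rw [hhi, PySem.List.slice_toNat]
      simp
      all_goals omega
  · -- row < 0: window empty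
    have hA : pvChkA matrice row 0 (matrice.length / 2) = true := by
      cases h : matrice.length / 2 with
      | zero => simp [pvChkA]
      | succ t =>
        simp only [pvChkA]
        rw [if_pos (by omega)]
    rw [hA]
    have hlo : max 0 (2 * row + 2 - (matrice.length : Int)) = 0 := by omega
    have hhi : max (max 0 (2 * row + 2 - (matrice.length : Int)))
        (min (matrice.length : Int) (2 * row + 2)) = max 0 (2 * row + 2 - (matrice.length : Int)) := by omega
    rw [hhi, hlo, PySem.List.slice_toNat]
    simp
    all_goals omega
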